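-- pv_equiv track=rewrite | github.com/PosnicAntoine/BIF_Master1_S1 | MyMiniMapper/MMM.py | getF
-- ===== SOURCE A (Python) =====
-- posdict = {"$":0,"a":1,"c":2,"g":3,"t":4}
--
-- def getF(bwt):
-- 	#First, we need to count the number of occurence of each letter
-- 	count = [0]*5
-- 	for c in bwt:
-- 		count[posdict[c]] = count[posdict[c]]+1
-- 	#Then, letters in an alphabetical order, the place is the place of the last previous letter.
-- 	f = [0]*5
-- 	curr=0
-- 	for i in range(len(count)):
-- 		f[i] = curr
-- 		curr = curr + count[i]
-- 	return f
-- ===== SOURCE B (Python) =====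
-- posdict = {"$":0,"a":1,"c":2,"g":3,"t":4}
--
-- def getF(bwt):
--     # F[i] = number of characters whose alphabet code is strictly smaller than i
--     codes = [posdict[c] for c in bwt]
--     return [sum(1 for x in codes if x < i) for i in range(5)]
-- ===== Notes on version B (the rewrite author's own statement) =====
-- stated objective: alternative
-- what changed: Replaces the 5-slot count array plus prefix-sum accumulator loop by directly counting, for each alphabet code i, how many characters have a strictly smaller code (F[i] = rank of code i in the sorted first column).
import Mathlib
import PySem

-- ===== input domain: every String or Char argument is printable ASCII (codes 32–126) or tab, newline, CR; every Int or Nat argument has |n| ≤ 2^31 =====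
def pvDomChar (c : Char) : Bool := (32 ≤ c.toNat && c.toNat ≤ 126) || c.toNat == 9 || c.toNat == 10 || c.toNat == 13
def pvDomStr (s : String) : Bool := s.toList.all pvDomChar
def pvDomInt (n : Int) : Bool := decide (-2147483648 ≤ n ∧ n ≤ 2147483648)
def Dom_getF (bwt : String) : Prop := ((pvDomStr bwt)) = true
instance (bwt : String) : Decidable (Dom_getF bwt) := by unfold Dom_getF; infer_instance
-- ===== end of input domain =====

-- B computes each F entry directly as the number of strictly smaller codes, instead of A's count array + prefix-sum accumulator loop (objective: alternative).

-- ===== PORT A =====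
-- module constant posdict = {"$":0,"a":1,"c":2,"g":3,"t":4}
def pvPosdict : PySem.Dict String Int :=
  PySem.Dict.ofList [("$", 0), ("a", 1), ("c", 2), ("g", 3), ("t", 4)]

-- posdict[c]; Python raises KeyError on any other character — exactly those inputs are excluded by Pre_getF, so the default 0 is never reached there
def pvCode (c : Char) : Int := PySem.Dict.getD pvPosdict (String.ofList [c]) 0

-- loop body: count[posdict[c]] = count[posdict[c]] + 1
def pvStep (count : List Int) (c : Char) : List Int :=
  PySem.List.pySetD count (pvCode c) (PySem.List.pyGetD count (pvCode c) 0 + 1)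

def getF (bwt : String) : List Int :=
  let count := bwt.toList.foldl pvStep [0, 0, 0, 0, 0]
  let fc := (PySem.List.pyRange 0 (PySem.List.len count) 1).foldl
    (fun (st : List Int × Int) i =>
      (PySem.List.pySetD st.1 i st.2, st.2 + PySem.List.pyGetD count i 0))
    ([0, 0, 0, 0, 0], 0)
  fc.1

-- ===== PORT B =====
def getF_alt (bwt : String) : List Int :=
  let codes := bwt.toList.map pvCode
  (PySem.List.pyRange 0 5 1).map
    (fun i => (codes.map (fun x => if x < i then (1 : Int) else 0)).sum)

-- ===== PRECONDITION & SPEC =====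
-- Pre_ excludes exactly the inputs containing a character that is not one of the five alphabet keys of posdict, on which A raises KeyError.
def Pre_getF (bwt : String) : Prop :=
  (bwt.toList.all (fun c => c == '$' || c == 'a' || c == 'c' || c == 'g' || c == 't')) = true
instance (bwt : String) : Decidable (Pre_getF bwt) := by unfold Pre_getF; infer_instance
def pvWitness_getF : String := "a$"

def Spec_getF (bwt : String) (out : List Int) : Prop := out = getF_alt bwt
instance (bwt : String) (out : List Int) : Decidable (Spec_getF bwt out) := by unfold Spec_getF; infer_instance

-- ===== CLAIM (what is proved, stated in full; the proofs are below) =====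
def Claim_equal_getF : Prop := ∀ (bwt : String), Dom_getF bwt → Pre_getF bwt → Spec_getF bwt (getF bwt)

-- ===== LEMMAS AND PROOFS =====

-- Pre_ in the propositional form the induction lemmas consume
theorem pvPre_chars (bwt : String) (h : Pre_getF bwt) :
    ∀ c ∈ bwt.toList, c = '$' ∨ c = 'a' ∨ c = 'c' ∨ c = 'g' ∨ c = 't' := by
  unfold Pre_getF at h
  intro c hc
  simpa [or_assoc] using List.all_eq_true.mp h c hc

-- pvS i l = B's sum for entry i, pulled back over the characters of l
def pvS (i : Int) (l : List Char) : Int :=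
  (l.map (fun c => if pvCode c < i then (1 : Int) else 0)).sum

theorem pvS_cons (i : Int) (c : Char) (l : List Char) :
    pvS i (c :: l) = (if pvCode c < i then (1 : Int) else 0) + pvS i l := by simp [pvS]

theorem pvCode_dollar : pvCode '$' = 0 := by decide
theorem pvCode_a : pvCode 'a' = 1 := by decide
theorem pvCode_c : pvCode 'c' = 2 := by decide
theorem pvCode_g : pvCode 'g' = 3 := by decide
theorem pvCode_t : pvCode 't' = 4 := by decide

theorem pvStep_dollar (a b c d e : Int) : pvStep [a,b,c,d,e] '$' = [a+1,b,c,d,e] := by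
  unfold pvStep; rw [pvCode_dollar]; simp [pysem]
theorem pvStep_a (a b c d e : Int) : pvStep [a,b,c,d,e] 'a' = [a,b+1,c,d,e] := by
  unfold pvStep; rw [pvCode_a]; simp [pysem]
theorem pvStep_c (a b c d e : Int) : pvStep [a,b,c,d,e] 'c' = [a,b,c+1,d,e] := by
  unfold pvStep; rw [pvCode_c]; simp [pysem]
theorem pvStep_g (a b c d e : Int) : pvStep [a,b,c,d,e] 'g' = [a,b,c,d+1,e] := by
  unfold pvStep; rw [pvCode_g]; simp [pysem]
theorem pvStep_t (a b c d e : Int) : pvStep [a,b,c,d,e] 't' = [a,b,c,d,e+1] := by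
  unfold pvStep; rw [pvCode_t]; simp [pysem]

-- A's counting fold, characterised by differences of pvS
theorem pvCountFold (l : List Char)
    (h : ∀ c ∈ l, c = '$' ∨ c = 'a' ∨ c = 'c' ∨ c = 'g' ∨ c = 't') :
    ∀ a b c d e : Int,
      l.foldl pvStep [a, b, c, d, e]
      = [a + (pvS 1 l - pvS 0 l), b + (pvS 2 l - pvS 1 l), c + (pvS 3 l - pvS 2 l),
         d + (pvS 4 l - pvS 3 l), e + (pvS 5 l - pvS 4 l)] := by
  induction l with
  | nil => intro a b c d e; simp [pvS]
  | cons ch l ih =>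
    intro a b c d e
    have hl : ∀ c ∈ l, c = '$' ∨ c = 'a' ∨ c = 'c' ∨ c = 'g' ∨ c = 't' :=
      fun c hc => h c (List.mem_cons_of_mem _ hc)
    rcases h ch List.mem_cons_self with h1 | h1 | h1 | h1 | h1 <;> subst h1
    · rw [List.foldl_cons, pvStep_dollar, ih hl]
      norm_num [pvS_cons, pvCode_dollar]; ring
    · rw [List.foldl_cons, pvStep_a, ih hl]
      norm_num [pvS_cons, pvCode_a]; ring
    · rw [List.foldl_cons, pvStep_c, ih hl]
      norm_num [pvS_cons, pvCode_c]; ring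
    · rw [List.foldl_cons, pvStep_g, ih hl]
      norm_num [pvS_cons, pvCode_g]; ring
    · rw [List.foldl_cons, pvStep_t, ih hl]
      norm_num [pvS_cons, pvCode_t]; ring

-- no code is below 0, so B's first entry is 0 on valid input
theorem pvS_zero (l : List Char)
    (h : ∀ c ∈ l, c = '$' ∨ c = 'a' ∨ c = 'c' ∨ c = 'g' ∨ c = 't') :
    pvS 0 l = 0 := by
  induction l with
  | nil => rfl
  | cons ch l ih =>
    have hl : ∀ c ∈ l, c = '$' ∨ c = 'a' ∨ c = 'c' ∨ c = 'g' ∨ c = 't' :=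
      fun c hc => h c (List.mem_cons_of_mem _ hc)
    rw [pvS_cons, ih hl]
    rcases h ch List.mem_cons_self with h1 | h1 | h1 | h1 | h1 <;> subst h1 <;>
      norm_num [pvCode_dollar, pvCode_a, pvCode_c, pvCode_g, pvCode_t]

-- B's result expressed with pvS
theorem pvAlt_eq (bwt : String) :
    getF_alt bwt = [pvS 0 bwt.toList, pvS 1 bwt.toList, pvS 2 bwt.toList,
                    pvS 3 bwt.toList, pvS 4 bwt.toList] := by
  unfold getF_alt
  rw [show PySem.List.pyRange 0 5 1 = [0, 1, 2, 3, 4] from by decide]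
  simp only [List.map_cons, List.map_nil, List.map_map, pvS]
  rfl

-- ===== VERDICT (by name: the statement is the Claim_ definition above) =====
theorem getF_spec : Claim_equal_getF := by
  intro bwt _ hpre
  unfold Spec_getF
  rw [pvAlt_eq]
  simp only [getF, pvCountFold bwt.toList (pvPre_chars bwt hpre),
    pvS_zero bwt.toList (pvPre_chars bwt hpre)]
  norm_num [pysem, List.range_succ]
  simp only [show Int.toNat 2 = 2 from rfl, show Int.toNat 3 = 3 from rfl,
    show Int.toNat 4 = 4 from rfl]
  norm_num [List.set]
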